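-- pv_equiv track=rewrite | github.com/JehyunJung/Code-Test-Preparing | algorithm/Programmers/Dynamic_Programming/level3_1.py | solution
-- ===== SOURCE A (Python) =====
-- def solution(N, number):
--     answer = -1
--     sets=[set() for _ in range(9)]
--     for i in range(1,9):
--         sets[i].add(int(str(N)*i))
--         for j in range(i):
--             for op1 in sets[j]:
--                 for op2 in sets[i-j]:
--                     sets[i].add(op1+op2)
--                     sets[i].add(op1-op2)
--                     sets[i].add(op1*op2)
--                     if op2 !=0:
--                         sets[i].add(op1//op2)
--
--         if number in sets[i]:
--             answer=i
--             break
--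
--     return answer
-- ===== SOURCE B (Python) =====
-- def solution(N, number):
--     cache = {}
--
--     def get(i):
--         # values formed by exactly i copies of N
--         if i not in cache:
--             vals = {int(str(N) * i)}
--             for j in range(1, i):
--                 for a in get(j):
--                     for b in get(i - j):
--                         vals |= {a + b, a - b, a * b} | ({a // b} if b else set())
--             cache[i] = vals
--         return cache[i]
--
--     return next((i for i in range(1, 9) if number in get(i)), -1)
-- ===== Notes on version B (the rewrite author's own statement) =====
-- stated objective: alternative
-- what changed: Bottom-up 9-slot array triple loop with in-place set mutation and break is replaced by a memoized top-down recursive helper get(i) built per level with set-comprehension unions, and the answer is taken with next() over a generator.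
import Mathlib
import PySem

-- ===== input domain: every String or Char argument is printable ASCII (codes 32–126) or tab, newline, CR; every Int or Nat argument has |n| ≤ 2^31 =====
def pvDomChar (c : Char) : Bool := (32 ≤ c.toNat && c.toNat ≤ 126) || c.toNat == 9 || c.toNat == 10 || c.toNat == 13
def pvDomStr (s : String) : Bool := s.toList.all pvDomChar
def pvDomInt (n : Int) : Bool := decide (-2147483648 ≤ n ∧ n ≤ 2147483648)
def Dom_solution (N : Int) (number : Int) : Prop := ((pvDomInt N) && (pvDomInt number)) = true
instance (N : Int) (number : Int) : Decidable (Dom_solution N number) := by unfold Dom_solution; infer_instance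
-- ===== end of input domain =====

-- B replaces A's bottom-up 9-slot array triple loop with a memoized top-down
-- recursive helper and a first-hit search; same cost, alternative decomposition.


-- int(str(N)*i); outside Pre_ (N < 0, i ≥ 2) Python raises ValueError, the .getD 0 default is never relied on inside Pre_
def repConcat (N : Int) (i : Nat) : Int :=
  (PySem.Int.ofStr? (String.join (List.replicate i (PySem.Int.toStr N)))).getD 0

-- ===== PORT A =====
-- the four 'sets[i].add(...)' statements of A's innermost loop body
def addOpsA (i : Nat) (op1 op2 : Int) (sets : List (PySem.Set Int)) : List (PySem.Set Int) :=
  let sets := sets.set i (PySem.Set.add (sets.getD i PySem.Set.empty) (op1 + op2))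
  let sets := sets.set i (PySem.Set.add (sets.getD i PySem.Set.empty) (op1 - op2))
  let sets := sets.set i (PySem.Set.add (sets.getD i PySem.Set.empty) (op1 * op2))
  if op2 ≠ 0 then
    sets.set i (PySem.Set.add (sets.getD i PySem.Set.empty) (PySem.Int.floordiv op1 op2))
  else sets

-- body of A's loop over i: seed sets[i], then the j/op1/op2 triple loop
def stepA (N : Int) (i : Nat) (sets0 : List (PySem.Set Int)) : List (PySem.Set Int) :=
  let sets1 := sets0.set i (PySem.Set.add (sets0.getD i PySem.Set.empty) (repConcat N i))
  (List.range i).foldl (fun sets j =>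
    (sets.getD j PySem.Set.empty).foldl (fun sets op1 =>
      (sets.getD (i - j) PySem.Set.empty).foldl (fun sets op2 =>
        addOpsA i op1 op2 sets) sets) sets) sets1

-- A's 'for i in range(1,9)' with the break / answer variable
def loopA (N : Int) (number : Int) : List Nat → List (PySem.Set Int) → Int
  | [], _ => -1
  | i :: rest, sets =>
    let sets := stepA N i sets
    if number ∈ sets.getD i PySem.Set.empty then (i : Int)
    else loopA N number rest sets

def solution (N : Int) (number : Int) : Int :=
  loopA N number (List.range' 1 8) (List.replicate 9 PySem.Set.empty)

-- ===== PORT B =====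
-- Source B: vals |= {a+b, a-b, a*b} | ({a//b} if b else set())
def opValsB (a b : Int) : PySem.Set Int :=
  PySem.Set.union (PySem.Set.ofList [a + b, a - b, a * b])
    (if b ≠ 0 then PySem.Set.ofList [PySem.Int.floordiv a b] else PySem.Set.empty)

-- Source B's memoized recursive helper get(i) (memoization is an evaluation detail)
def getB (N : Int) (i : Nat) : PySem.Set Int :=
  (List.range' 1 (i - 1)).attach.foldl
    (fun vals j =>
      (getB N j.1).foldl (fun vals a =>
        (getB N (i - j.1)).foldl (fun vals b =>
          PySem.Set.union vals (opValsB a b)) vals) vals)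
    (PySem.Set.ofList [repConcat N i])
termination_by i
decreasing_by
  · have h := j.2; rw [List.mem_range'] at h; omega
  · have h := j.2; rw [List.mem_range'] at h; omega

def solution_alt (N : Int) (number : Int) : Int :=
  match (List.range' 1 8).find? (fun i => PySem.Set.contains (getB N i) number) with
  | some i => (i : Int)
  | none => -1

-- ===== PRECONDITION & SPEC =====
-- Pre_ excludes N < 0 with number ≠ N: there Python A (and B) raise ValueError at int(str(N)*2),
-- since str(N)*2 like '-3-3' is not a valid int literal (with number = N the loop breaks at i = 1 first).
def Pre_solution (N : Int) (number : Int) : Prop := 0 ≤ N ∨ number = N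
instance (N : Int) (number : Int) : Decidable (Pre_solution N number) := by unfold Pre_solution; infer_instance
def pvWitness_solution : Int × Int := (5, 12)

def Spec_solution (N : Int) (number : Int) (out : Int) : Prop := out = solution_alt N number
instance (N : Int) (number : Int) (out : Int) : Decidable (Spec_solution N number out) := by unfold Spec_solution; infer_instance

-- ===== CLAIM (what is proved, stated in full; the proofs are below) =====
def Claim_equal_solution : Prop := ∀ (N : Int) (number : Int), Dom_solution N number → Pre_solution N number → Spec_solution N number (solution N number)

-- ===== LEMMAS AND PROOFS =====

def opsP (a b x : Int) : Prop :=
  x = a + b ∨ x = a - b ∨ x = a * b ∨ (b ≠ 0 ∧ x = PySem.Int.floordiv a b)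

theorem length_addOpsA (i : Nat) (a b : Int) (sets : List (PySem.Set Int)) :
    (addOpsA i a b sets).length = sets.length := by
  unfold addOpsA; split <;> simp

theorem getD_addOpsA_ne (i : Nat) (a b : Int) (sets : List (PySem.Set Int)) (k : Nat)
    (hk : k ≠ i) : (addOpsA i a b sets).getD k PySem.Set.empty = sets.getD k PySem.Set.empty := by
  unfold addOpsA
  split <;> simp [List.getD_eq_getElem?_getD, List.getElem?_set_ne (Ne.symm hk)]

theorem mem_addOpsA (i : Nat) (a b : Int) (sets : List (PySem.Set Int))
    (h : i < sets.length) (x : Int) :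
    x ∈ (addOpsA i a b sets).getD i PySem.Set.empty ↔
      x ∈ sets.getD i PySem.Set.empty ∨ opsP a b x := by
  unfold addOpsA opsP
  split <;>
    simp [List.getD_eq_getElem?_getD, h, PySem.Set.mem_add] <;>
    tauto
-- innermost fold (over op2 list L)
theorem op2fold (i : Nat) (a : Int) (L : List Int) :
    ∀ (acc : List (PySem.Set Int)), i < acc.length →
      (let r := L.foldl (fun s op2 => addOpsA i a op2 s) acc
       r.length = acc.length ∧
       (∀ k, k ≠ i → r.getD k PySem.Set.empty = acc.getD k PySem.Set.empty) ∧
       (∀ x, x ∈ r.getD i PySem.Set.empty ↔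
          x ∈ acc.getD i PySem.Set.empty ∨ ∃ b ∈ L, opsP a b x)) := by
  induction L with
  | nil => intro acc h; exact ⟨rfl, fun _ _ => rfl, fun x => by simp⟩
  | cons b L ih =>
    intro acc h
    have h' : i < (addOpsA i a b acc).length := by rw [length_addOpsA]; exact h
    obtain ⟨hl, hne, hmem⟩ := ih (addOpsA i a b acc) h'
    simp only [List.foldl_cons]
    refine ⟨by rw [hl, length_addOpsA], ?_, ?_⟩
    · intro k hk; rw [hne k hk, getD_addOpsA_ne i a b acc k hk]
    · intro x
      rw [hmem x, mem_addOpsA i a b acc h x]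
      simp only [List.mem_cons]
      constructor
      · rintro ((h1 | h1) | ⟨b', hb', h2⟩)
        · exact Or.inl h1
        · exact Or.inr ⟨b, Or.inl rfl, h1⟩
        · exact Or.inr ⟨b', Or.inr hb', h2⟩
      · rintro (h1 | ⟨b', (rfl | hb'), h2⟩)
        · exact Or.inl (Or.inl h1)
        · exact Or.inl (Or.inr h2)
        · exact Or.inr ⟨b', hb', h2⟩

-- middle fold (over op1 list L1); each iteration reads entry m = i - j of the accumulator
theorem op1fold (i m : Nat) (hm : m ≠ i) (L1 : List Int) :
    ∀ (acc : List (PySem.Set Int)), i < acc.length →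
      (let r := L1.foldl (fun s op1 =>
        (s.getD m PySem.Set.empty).foldl (fun s op2 => addOpsA i op1 op2 s) s) acc
       r.length = acc.length ∧
       (∀ k, k ≠ i → r.getD k PySem.Set.empty = acc.getD k PySem.Set.empty) ∧
       (∀ x, x ∈ r.getD i PySem.Set.empty ↔
          x ∈ acc.getD i PySem.Set.empty ∨
            ∃ a ∈ L1, ∃ b ∈ acc.getD m PySem.Set.empty, opsP a b x)) := by
  induction L1 with
  | nil => intro acc h; exact ⟨rfl, fun _ _ => rfl, fun x => by simp⟩
  | cons a L1 ih =>
    intro acc h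
    obtain ⟨hl1, hne1, hmem1⟩ := op2fold i a (acc.getD m PySem.Set.empty) acc h
    set acc' := (acc.getD m PySem.Set.empty).foldl (fun s op2 => addOpsA i a op2 s) acc with hacc'
    have h' : i < acc'.length := by rw [hl1]; exact h
    obtain ⟨hl, hne, hmem⟩ := ih acc' h'
    have hm' : acc'.getD m PySem.Set.empty = acc.getD m PySem.Set.empty := hne1 m hm
    simp only [List.foldl_cons]
    refine ⟨by rw [hl, hl1], ?_, ?_⟩
    · intro k hk; rw [hne k hk, hne1 k hk]
    · intro x
      rw [hmem x, hmem1 x, hm']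
      simp only [List.mem_cons]
      constructor
      · rintro ((h1 | ⟨b, hb, h2⟩) | ⟨a', ha', b, hb, h2⟩)
        · exact Or.inl h1
        · exact Or.inr ⟨a, Or.inl rfl, b, hb, h2⟩
        · exact Or.inr ⟨a', Or.inr ha', b, hb, h2⟩
      · rintro (h1 | ⟨a', (rfl | ha'), b, hb, h2⟩)
        · exact Or.inl (Or.inl h1)
        · exact Or.inl (Or.inr ⟨b, hb, h2⟩)
        · exact Or.inr ⟨a', ha', b, hb, h2⟩

-- outer fold over the j list of A's triple loop
theorem jfold (i : Nat) (hi : 0 < i) (js : List Nat) (hjs : ∀ j ∈ js, j < i) :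
    ∀ (acc : List (PySem.Set Int)), i < acc.length →
      acc.getD 0 PySem.Set.empty = [] →
      (let r := js.foldl (fun sets j =>
        (sets.getD j PySem.Set.empty).foldl (fun sets op1 =>
          (sets.getD (i - j) PySem.Set.empty).foldl (fun sets op2 =>
            addOpsA i op1 op2 sets) sets) sets) acc
       r.length = acc.length ∧
       (∀ k, k ≠ i → r.getD k PySem.Set.empty = acc.getD k PySem.Set.empty) ∧
       (∀ x, x ∈ r.getD i PySem.Set.empty ↔
          x ∈ acc.getD i PySem.Set.empty ∨
            ∃ j ∈ js, ∃ a ∈ acc.getD j PySem.Set.empty,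
              ∃ b ∈ acc.getD (i - j) PySem.Set.empty, opsP a b x)) := by
  induction js with
  | nil => intro acc h h0; exact ⟨rfl, fun _ _ => rfl, fun x => by simp⟩
  | cons j js ih =>
    intro acc h h0
    have hj : j < i := hjs j (List.mem_cons_self ..)
    have hjs' : ∀ j' ∈ js, j' < i := fun j' hj' => hjs j' (List.mem_cons_of_mem _ hj')
    have hmne : i - j ≠ i ∨ j = 0 := by omega
    -- the state after processing head j
    obtain ⟨hl1, hne1, hmem1⟩ :
        (let r := (acc.getD j PySem.Set.empty).foldl (fun sets op1 =>
            (sets.getD (i - j) PySem.Set.empty).foldl (fun sets op2 =>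
              addOpsA i op1 op2 sets) sets) acc
         r.length = acc.length ∧
         (∀ k, k ≠ i → r.getD k PySem.Set.empty = acc.getD k PySem.Set.empty) ∧
         (∀ x, x ∈ r.getD i PySem.Set.empty ↔
            x ∈ acc.getD i PySem.Set.empty ∨
              ∃ a ∈ acc.getD j PySem.Set.empty,
                ∃ b ∈ acc.getD (i - j) PySem.Set.empty, opsP a b x)) := by
      rcases hmne with hmne | rfl
      · exact op1fold i (i - j) hmne (acc.getD j PySem.Set.empty) acc h
      · rw [h0]
        exact ⟨rfl, fun _ _ => rfl, fun x => by simp⟩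
    set acc' := (acc.getD j PySem.Set.empty).foldl (fun sets op1 =>
        (sets.getD (i - j) PySem.Set.empty).foldl (fun sets op2 =>
          addOpsA i op1 op2 sets) sets) acc with hacc'
    have h' : i < acc'.length := by rw [hl1]; exact h
    have h0' : acc'.getD 0 PySem.Set.empty = [] := by
      rw [hne1 0 (by omega), h0]
    obtain ⟨hl, hne, hmem⟩ := ih hjs' acc' h' h0'
    simp only [List.foldl_cons]
    refine ⟨by rw [hl, hl1], ?_, ?_⟩
    · intro k hk; rw [hne k hk, hne1 k hk]
    · intro x
      rw [hmem x, hmem1 x]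
      -- transport the tail existential from acc' back to acc
      have htail : ∀ j' ∈ js,
          ((∃ a ∈ acc'.getD j' PySem.Set.empty,
             ∃ b ∈ acc'.getD (i - j') PySem.Set.empty, opsP a b x) ↔
           (∃ a ∈ acc.getD j' PySem.Set.empty,
             ∃ b ∈ acc.getD (i - j') PySem.Set.empty, opsP a b x)) := by
        intro j' hj'
        have hj'i : j' < i := hjs' j' hj'
        by_cases hz : j' = 0
        · subst hz
          rw [h0', h0]
          simp
        · rw [hne1 j' (by omega), hne1 (i - j') (by omega)]
      constructor
      · rintro ((h1 | h1) | ⟨j', hj', h2⟩)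
        · exact Or.inl h1
        · exact Or.inr ⟨j, List.mem_cons_self .., h1⟩
        · exact Or.inr ⟨j', List.mem_cons_of_mem _ hj', (htail j' hj').1 h2⟩
      · rintro (h1 | ⟨j', hj', h2⟩)
        · exact Or.inl (Or.inl h1)
        · rcases List.mem_cons.1 hj' with rfl | hj'
          · exact Or.inl (Or.inr h2)
          · exact Or.inr ⟨j', hj', (htail j' hj').2 h2⟩

-- characterisation of A's per-i step
theorem stepA_facts (N : Int) (i : Nat) (hi : 0 < i) (sets : List (PySem.Set Int))
    (h : i < sets.length) (h0 : sets.getD 0 PySem.Set.empty = []) :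
    (stepA N i sets).length = sets.length ∧
    (∀ k, k ≠ i → (stepA N i sets).getD k PySem.Set.empty = sets.getD k PySem.Set.empty) ∧
    (∀ x, x ∈ (stepA N i sets).getD i PySem.Set.empty ↔
       (x ∈ sets.getD i PySem.Set.empty ∨ x = repConcat N i) ∨
         ∃ j ∈ List.range i, ∃ a ∈ sets.getD j PySem.Set.empty,
           ∃ b ∈ sets.getD (i - j) PySem.Set.empty, opsP a b x) := by
  unfold stepA
  set sets1 := sets.set i (PySem.Set.add (sets.getD i PySem.Set.empty) (repConcat N i)) with hs1
  have hl1 : sets1.length = sets.length := by simp [hs1]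
  have h1 : i < sets1.length := by rw [hl1]; exact h
  have hne1 : ∀ k, k ≠ i → sets1.getD k PySem.Set.empty = sets.getD k PySem.Set.empty := by
    intro k hk
    simp [hs1, List.getD_eq_getElem?_getD, List.getElem?_set_ne (Ne.symm hk)]
  have hD1 : sets1.getD i PySem.Set.empty
      = PySem.Set.add (sets.getD i PySem.Set.empty) (repConcat N i) := by
    simp [hs1, List.getD_eq_getElem?_getD, List.getElem?_set_self h]
  have h01 : sets1.getD 0 PySem.Set.empty = [] := by
    rw [hne1 0 (by omega), h0]
  have hjs : ∀ j ∈ List.range i, j < i := by intro j hj; exact List.mem_range.1 hj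
  obtain ⟨hl, hne, hmem⟩ := jfold i hi (List.range i) hjs sets1 h1 h01
  refine ⟨by rw [hl, hl1], ?_, ?_⟩
  · intro k hk; rw [hne k hk, hne1 k hk]
  · intro x
    rw [hmem x, hD1, PySem.Set.mem_add]
    have hent : ∀ j ∈ List.range i,
        ((∃ a ∈ sets1.getD j PySem.Set.empty,
           ∃ b ∈ sets1.getD (i - j) PySem.Set.empty, opsP a b x) ↔
         (∃ a ∈ sets.getD j PySem.Set.empty,
           ∃ b ∈ sets.getD (i - j) PySem.Set.empty, opsP a b x)) := by
      intro j hj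
      have hji : j < i := hjs j hj
      by_cases hz : j = 0
      · subst hz
        rw [h01, h0]
        simp
      · rw [hne1 j (by omega), hne1 (i - j) (by omega)]
    constructor
    · rintro (h1' | ⟨j, hj, h2⟩)
      · exact Or.inl h1'
      · exact Or.inr ⟨j, hj, (hent j hj).1 h2⟩
    · rintro (h1' | ⟨j, hj, h2⟩)
      · exact Or.inl h1'
      · exact Or.inr ⟨j, hj, (hent j hj).2 h2⟩

-- generic membership through a pure set-building fold
theorem mem_foldl_gen {β : Type} (l : List β) (f : PySem.Set Int → β → PySem.Set Int)
    (P : β → Int → Prop) (hf : ∀ s e x, e ∈ l → (x ∈ f s e ↔ x ∈ s ∨ P e x)) :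
    ∀ (s0 : PySem.Set Int) (x : Int), x ∈ l.foldl f s0 ↔ x ∈ s0 ∨ ∃ e ∈ l, P e x := by
  induction l with
  | nil => intro s0 x; simp
  | cons e l ih =>
    intro s0 x
    have hf' : ∀ s e' x, e' ∈ l → (x ∈ f s e' ↔ x ∈ s ∨ P e' x) :=
      fun s e' x he' => hf s e' x (List.mem_cons_of_mem _ he')
    simp only [List.foldl_cons]
    rw [ih hf' (f s0 e) x, hf s0 e x (List.mem_cons_self ..)]
    simp only [List.mem_cons]
    constructor
    · rintro ((h1 | h1) | ⟨e', he', h2⟩)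
      · exact Or.inl h1
      · exact Or.inr ⟨e, Or.inl rfl, h1⟩
      · exact Or.inr ⟨e', Or.inr he', h2⟩
    · rintro (h1 | ⟨e', (rfl | he'), h2⟩)
      · exact Or.inl (Or.inl h1)
      · exact Or.inl (Or.inr h2)
      · exact Or.inr ⟨e', he', h2⟩

theorem mem_opValsB (a b x : Int) : x ∈ opValsB a b ↔ opsP a b x := by
  unfold opValsB opsP
  by_cases hb : b = 0 <;>
    simp [hb, PySem.Set.mem_union, PySem.Set.mem_ofList] <;> tauto

-- unfolding characterisation of B's recursive helper
theorem mem_getB (N : Int) (i : Nat) (x : Int) :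
    x ∈ getB N i ↔ x = repConcat N i ∨
      ∃ j ∈ List.range' 1 (i - 1), ∃ a ∈ getB N j,
        ∃ b ∈ getB N (i - j), opsP a b x := by
  rw [getB]
  rw [mem_foldl_gen _ _
      (fun j x => ∃ a ∈ getB N j.1, ∃ b ∈ getB N (i - j.1), opsP a b x)
      (fun vals j x _ => by
        rw [mem_foldl_gen _ _
            (fun a x => ∃ b ∈ getB N (i - j.1), opsP a b x)
            (fun vals a x _ => by
              rw [mem_foldl_gen _ _ (fun b x => opsP a b x)
                  (fun vals b x _ => by
                    rw [PySem.Set.mem_union, mem_opValsB]) vals x])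
            vals x])]
  constructor
  · rintro (h1 | ⟨⟨j, hj⟩, _, h2⟩)
    · exact Or.inl (by simpa [PySem.Set.mem_ofList] using h1)
    · exact Or.inr ⟨j, hj, h2⟩
  · rintro (h1 | ⟨j, hj, h2⟩)
    · exact Or.inl (by simpa [PySem.Set.mem_ofList] using h1)
    · exact Or.inr ⟨⟨j, hj⟩, List.mem_attach _ _, h2⟩

-- main loop equivalence, by induction on the remaining indices
theorem mainLoop (N number : Int) : ∀ (n s : Nat), s + n = 9 → 1 ≤ s →
    ∀ (sets : List (PySem.Set Int)), sets.length = 9 →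
    (∀ k, k < s → ∀ x, x ∈ sets.getD k PySem.Set.empty ↔ (1 ≤ k ∧ x ∈ getB N k)) →
    (∀ k, s ≤ k → sets.getD k PySem.Set.empty = []) →
    loopA N number (List.range' s n) sets =
      (match (List.range' s n).find? (fun i => PySem.Set.contains (getB N i) number) with
       | some i => (i : Int) | none => -1) := by
  intro n
  induction n with
  | zero => intro s _ _ sets _ _ _; rfl
  | succ n ih =>
    intro s hsum hs sets hlen hlow hhigh
    have h0 : sets.getD 0 PySem.Set.empty = [] := by
      apply List.eq_nil_iff_forall_not_mem.2
      intro x hx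
      exact absurd ((hlow 0 (by omega) x).1 hx).1 (by omega)
    have hsl : s < sets.length := by omega
    obtain ⟨hl, hne, hmem⟩ := stepA_facts N s (by omega) sets hsl h0
    have hkey : ∀ x, x ∈ (stepA N s sets).getD s PySem.Set.empty ↔ x ∈ getB N s := by
      intro x
      rw [hmem x, mem_getB, hhigh s le_rfl]
      simp only [List.not_mem_nil, false_or]
      constructor
      · rintro (h1 | ⟨j, hj, a, ha, b, hb, hP⟩)
        · exact Or.inl h1
        · have hji : j < s := List.mem_range.1 hj
          by_cases hz : j = 0
          · subst hz; rw [h0] at ha; cases ha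
          · have hja := (hlow j (by omega) a).1 ha
            have hjb := (hlow (s - j) (by omega) b).1 hb
            exact Or.inr ⟨j, List.mem_range'_1.2 (by omega), a, hja.2, b, hjb.2, hP⟩
      · rintro (h1 | ⟨j, hj, a, ha, b, hb, hP⟩)
        · exact Or.inl h1
        · have hji := List.mem_range'_1.1 hj
          refine Or.inr ⟨j, List.mem_range.2 (by omega), a, ?_, b, ?_, hP⟩
          · exact (hlow j (by omega) a).2 ⟨by omega, ha⟩
          · exact (hlow (s - j) (by omega) b).2 ⟨by omega, hb⟩
    rw [List.range'_succ]
    have hstep : loopA N number (s :: List.range' (s + 1) n) sets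
        = if number ∈ (stepA N s sets).getD s PySem.Set.empty then (s : Int)
          else loopA N number (List.range' (s + 1) n) (stepA N s sets) := rfl
    rw [hstep]
    by_cases hfound : number ∈ getB N s
    · have hin : number ∈ (stepA N s sets).getD s PySem.Set.empty := (hkey number).2 hfound
      rw [List.find?_cons_of_pos (by simpa [PySem.Set.contains_iff] using hfound), if_pos hin]
    · have hnot : number ∉ (stepA N s sets).getD s PySem.Set.empty :=
        fun hmemn => hfound ((hkey number).1 hmemn)
      rw [List.find?_cons_of_neg (by simpa [PySem.Set.contains_iff] using hfound), if_neg hnot]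
      exact ih (s + 1) (by omega) (by omega) (stepA N s sets) (by rw [hl, hlen])
        (by
          intro k hk x
          rcases Nat.lt_succ_iff_lt_or_eq.1 hk with hk' | rfl
          · rw [hne k (by omega)]; exact hlow k hk' x
          · rw [hkey x]; exact ⟨fun hx => ⟨hs, hx⟩, fun hx => hx.2⟩)
        (by intro k hk; rw [hne k (by omega)]; exact hhigh k (by omega))

theorem solution_key' (N number : Int) : solution N number = solution_alt N number := by
  have hrep : ∀ k : Nat,
      (List.replicate 9 (PySem.Set.empty : PySem.Set Int)).getD k PySem.Set.empty = [] := by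
    intro k
    rw [List.getD_eq_getElem?_getD, List.getElem?_replicate]
    split <;> rfl
  unfold solution solution_alt
  apply mainLoop N number 8 1 rfl le_rfl
  · simp
  · intro k hk x
    rw [hrep k]
    simp only [List.not_mem_nil, false_iff]
    rintro ⟨h1, _⟩
    omega
  · intro k _
    exact hrep k

-- ===== VERDICT (by name: the statement is the Claim_ definition above) =====
theorem solution_spec : Claim_equal_solution := by
  intro N number _ _
  unfold Spec_solution
  exact solution_key' N number
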